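-- pv_equiv track=rewrite | github.com/Pragith-C/Python | club_functions.py | get_clubs_of_friends
-- ===== SOURCE A (Python) =====
-- from typing import List, Tuple, Dict, TextIO
--
-- def get_clubs_of_friends(person_to_friends: Dict[str, List[str]],
--                          person_to_clubs: Dict[str, List[str]],
--                          person: str) -> List[str]:
--     """Return a list, sorted in alphabetical order, of the clubs in
--     person_to_clubs that person's friends from person_to_friends
--     belong to, excluding the clubs that person belongs to.  Each club
--     appears in the returned list once per each of the person's friends
--     who belong to it.
--
--     >>> get_clubs_of_friends(P2F, P2C, 'Danny R Tanner')
--     ['Comics R Us', 'Rock N Rollers']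
--
--     >>> get_clubs_of_friends(P2F, P2C, 'Joey Gladstone')
--     []
--
--     """
--     friend_clubs = []
--
--     if person in person_to_clubs:
--         person_clubs = person_to_clubs[person]
--     else:
--         person_clubs = []
--
--     if person in person_to_friends:
--         friend_list = person_to_friends[person]
--     else:
--         friend_list = []
--
--     for item in friend_list:
--         if item in person_to_clubs:
--             for club in person_to_clubs[item]:
--                 if club not in person_clubs:
--                     friend_clubs.append(club)
--
--     friend_clubs.sort()
--     return friend_clubs
-- ===== SOURCE B (Python) =====
-- def get_clubs_of_friends(person_to_friends, person_to_clubs, person):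
--     own = person_to_clubs.get(person, [])
--     counts = {}
--     for friend in person_to_friends.get(person, []):
--         for club in person_to_clubs.get(friend, []):
--             if club not in own:
--                 counts[club] = counts.get(club, 0) + 1
--     result = []
--     for club in sorted(counts):
--         result.extend([club] * counts[club])
--     return result
-- ===== Notes on version B (the rewrite author's own statement) =====
-- stated objective: alternative
-- what changed: B maintains a frequency table (dict of club -> count) instead of a growing list plus a final full-list sort, then emits the result by expanding the sorted distinct keys by their counts.
import Mathlib
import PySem

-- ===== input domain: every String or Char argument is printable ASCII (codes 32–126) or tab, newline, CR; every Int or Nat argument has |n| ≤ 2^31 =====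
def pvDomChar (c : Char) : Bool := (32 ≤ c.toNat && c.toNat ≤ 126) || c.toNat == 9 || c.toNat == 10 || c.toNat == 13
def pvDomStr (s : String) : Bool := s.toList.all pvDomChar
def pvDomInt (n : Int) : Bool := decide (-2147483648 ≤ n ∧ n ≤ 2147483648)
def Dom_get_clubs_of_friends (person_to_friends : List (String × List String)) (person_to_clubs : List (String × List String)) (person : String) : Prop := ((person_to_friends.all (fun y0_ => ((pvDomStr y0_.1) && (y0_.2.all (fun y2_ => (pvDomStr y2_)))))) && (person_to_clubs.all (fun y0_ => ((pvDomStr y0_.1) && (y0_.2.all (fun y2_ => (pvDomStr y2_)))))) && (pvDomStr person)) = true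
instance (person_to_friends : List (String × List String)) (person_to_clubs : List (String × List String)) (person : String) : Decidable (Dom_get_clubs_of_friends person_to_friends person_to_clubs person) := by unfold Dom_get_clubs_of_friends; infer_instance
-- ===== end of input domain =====

-- B replaces A's growing list + final full-list sort by a frequency table whose sorted
-- distinct keys are expanded by their counts (objective: alternative algorithm, same cost).

-- shared dict model: first-match lookup in the association list (Python dict membership / indexing / .get)
def pvLookup (d : List (String × List String)) (k : String) : Option (List String) :=
  (d.find? (fun p => p.1 == k)).map (·.2)

-- ===== PORT A =====
def get_clubs_of_friends (person_to_friends : List (String × List String)) (person_to_clubs : List (String × List String)) (person : String) : List String :=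
  let person_clubs : List String :=
    match pvLookup person_to_clubs person with
    | some v => v
    | none => []
  let friend_list : List String :=
    match pvLookup person_to_friends person with
    | some v => v
    | none => []
  let friend_clubs : List String :=
    friend_list.foldl (fun acc item =>
      match pvLookup person_to_clubs item with
      | some clubs =>
          clubs.foldl (fun acc club =>
            if person_clubs.contains club then acc else acc ++ [club]) acc
      | none => acc) []
  PySem.List.sorted friend_clubs (fun x => x) false

-- ===== PORT B =====
def get_clubs_of_friends_alt (person_to_friends : List (String × List String)) (person_to_clubs : List (String × List String)) (person : String) : List String :=
  let own : List String := (pvLookup person_to_clubs person).getD []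
  let counts : PySem.Dict String Int :=
    ((pvLookup person_to_friends person).getD []).foldl (fun d friend =>
      ((pvLookup person_to_clubs friend).getD []).foldl (fun d club =>
        if own.contains club then d else d.insert club (d.getD club 0 + 1)) d)
      PySem.Dict.empty
  (PySem.List.sorted counts.keys (fun x => x) false).foldl
    (fun acc club => acc ++ List.replicate (counts.getD club 0).toNat club) []

-- ===== PRECONDITION & SPEC =====
def Spec_get_clubs_of_friends (person_to_friends : List (String × List String)) (person_to_clubs : List (String × List String)) (person : String) (out : List String) : Prop := out = get_clubs_of_friends_alt person_to_friends person_to_clubs person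
instance (person_to_friends : List (String × List String)) (person_to_clubs : List (String × List String)) (person : String) (out : List String) : Decidable (Spec_get_clubs_of_friends person_to_friends person_to_clubs person out) := by unfold Spec_get_clubs_of_friends; infer_instance

-- ===== CLAIM (what is proved, stated in full; the proofs are below) =====
def Claim_equal_get_clubs_of_friends : Prop := ∀ (person_to_friends : List (String × List String)) (person_to_clubs : List (String × List String)) (person : String), Dom_get_clubs_of_friends person_to_friends person_to_clubs person → Spec_get_clubs_of_friends person_to_friends person_to_clubs person (get_clubs_of_friends person_to_friends person_to_clubs person)

-- ===== LEMMAS AND PROOFS =====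

-- the multiset both programs arrange: every friend's clubs not among the person's own
def pvCollected (person_to_friends person_to_clubs : List (String × List String)) (person : String) : List String :=
  ((pvLookup person_to_friends person).getD []).flatMap
    (fun f => ((pvLookup person_to_clubs f).getD []).filter (fun c => !( ((pvLookup person_to_clubs person).getD []).contains c)))

-- A's inner club loop is a filter
theorem innerA_eq (own clubs acc : List String) :
    clubs.foldl (fun acc club => if own.contains club then acc else acc ++ [club]) acc
      = acc ++ clubs.filter (fun c => !own.contains c) := by
  have h : (fun (acc : List String) club => if own.contains club then acc else acc ++ [club])
      = (fun acc club => if (!own.contains club) then acc ++ [club] else acc) := by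
    funext a c; cases own.contains c <;> simp
  rw [h, PySem.List.foldl_append_if_eq_filter]

-- A's nested loop collects pvCollected
theorem outerA_eq (p2c : List (String × List String)) (own : List String) :
    ∀ (fl acc : List String),
    fl.foldl (fun acc item =>
      match pvLookup p2c item with
      | some clubs => clubs.foldl (fun acc club => if own.contains club then acc else acc ++ [club]) acc
      | none => acc) acc
      = acc ++ fl.flatMap (fun f => ((pvLookup p2c f).getD []).filter (fun c => !own.contains c)) := by
  intro fl
  induction fl with
  | nil => intro acc; simp
  | cons f t ih =>
      intro acc
      simp only [List.foldl_cons, List.flatMap_cons]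
      cases pvLookup p2c f with
      | none =>
          simp only [Option.getD_none, List.filter_nil, List.nil_append]
          exact ih acc
      | some clubs =>
          simp only [Option.getD_some]
          rw [innerA_eq, ih, List.append_assoc]

-- B's inner counting loop counts the filtered clubs
theorem innerB_eq (own clubs : List String) (d : PySem.Dict String Int) :
    clubs.foldl (fun d club => if own.contains club then d else d.insert club (d.getD club 0 + 1)) d
      = (clubs.filter (fun c => !own.contains c)).foldl (fun d c => d.insert c (d.getD c 0 + 1)) d := by
  induction clubs generalizing d with
  | nil => rfl
  | cons c t ih =>
      by_cases h : own.contains c = true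
      · rw [List.foldl_cons, if_pos h, List.filter_cons_of_neg (by rw [h]; decide), ih]
      · have h' : own.contains c = false := by revert h; cases own.contains c <;> simp
        rw [List.foldl_cons, if_neg h, List.filter_cons_of_pos (by rw [h']; decide), List.foldl_cons, ih]

-- B's nested loop builds Counter(pvCollected …)
theorem countsB_eq (p2f p2c : List (String × List String)) (person : String) :
    ((pvLookup p2f person).getD []).foldl (fun d friend =>
      ((pvLookup p2c friend).getD []).foldl (fun d club =>
        if ((pvLookup p2c person).getD []).contains club then d
        else d.insert club (d.getD club 0 + 1)) d)
      PySem.Dict.empty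
      = PySem.Dict.counter (pvCollected p2f p2c person) := by
  rw [pvCollected, ← PySem.Dict.foldl_insert_getD_add_one_eq_counter, List.foldl_flatMap]
  exact PySem.List.foldl_congr_mem _ _ _ _ (fun d f _ => innerB_eq _ _ d)

-- counting the expansion of a nodup key list
theorem count_expansion (L : List String) (a : String) :
    ∀ (ks : List String), ks.Nodup →
    List.count a (ks.flatMap (fun k => List.replicate (L.count k) k))
      = if a ∈ ks then L.count a else 0 := by
  intro ks
  induction ks with
  | nil => intro _; simp
  | cons k t ih =>
      intro hnd
      have hkt : k ∉ t := (List.nodup_cons.mp hnd).1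
      have hnt : t.Nodup := (List.nodup_cons.mp hnd).2
      simp only [List.flatMap_cons, List.count_append, ih hnt, List.count_replicate,
        List.mem_cons]
      by_cases hak : a = k
      · subst hak
        simp [hkt]
      · have : (k == a) = false := by simp [Ne.symm hak]
        simp [this, hak]

-- the expansion of a strictly increasing key list is sorted
theorem pairwise_expansion (n : String → Nat) :
    ∀ (ks : List String), ks.Pairwise (fun a b => a < b) →
    (ks.flatMap (fun k => List.replicate (n k) k)).Pairwise (fun a b => a ≤ b) := by
  intro ks
  induction ks with
  | nil => intro _; simp
  | cons k t ih =>
      intro hp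
      have hk : ∀ b ∈ t, k < b := (List.pairwise_cons.mp hp).1
      have ht : t.Pairwise (fun a b => a < b) := (List.pairwise_cons.mp hp).2
      simp only [List.flatMap_cons]
      rw [List.pairwise_append]
      refine ⟨List.pairwise_replicate.mpr (Or.inr le_rfl), ih ht, ?_⟩
      intro x hx y hy
      have hxk : x = k := List.eq_of_mem_replicate hx
      obtain ⟨k', hk't, hyk'⟩ := List.mem_flatMap.mp hy
      have hyk : y = k' := List.eq_of_mem_replicate hyk'
      subst hxk; subst hyk
      exact le_of_lt (hk _ hk't)

-- the sorted-keys expansion IS sorted(L)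
theorem expansion_eq_sorted (L : List String) :
    PySem.List.sorted L (fun x => x) false
      = (PySem.List.sorted (PySem.Set.ofList L) (fun x => x) false).flatMap
          (fun k => List.replicate (L.count k) k) := by
  set ks := PySem.List.sorted (PySem.Set.ofList L) (fun x => x) false with hks
  have hperm : ks.Perm (PySem.Set.ofList L) := PySem.List.sorted_perm _ _ _
  have hnd : ks.Nodup := hperm.nodup_iff.mpr (PySem.Set.nodup_ofList L)
  have hmem : ∀ a, a ∈ ks ↔ a ∈ L := by
    intro a
    rw [hperm.mem_iff, PySem.Set.mem_ofList]
  have hcnt : ∀ a, List.count a (ks.flatMap (fun k => List.replicate (L.count k) k)) = L.count a := by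
    intro a
    rw [count_expansion L a ks hnd]
    by_cases h : a ∈ ks
    · simp [h]
    · have : a ∉ L := fun hc => h ((hmem a).mpr hc)
      simp [h, List.count_eq_zero_of_not_mem this]
  have hpermL : (ks.flatMap (fun k => List.replicate (L.count k) k)).Perm L :=
    List.perm_iff_count.mpr (fun a => by simp [hcnt a])
  have hpw : (ks.flatMap (fun k => List.replicate (L.count k) k)).Pairwise (fun a b => a ≤ b) :=
    pairwise_expansion _ ks (hks ▸ PySem.List.sorted_ofList_pairwise_lt L)
  exact PySem.List.sorted_id_eq_of_perm_of_pairwise _ _ hpermL hpw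

-- ===== VERDICT (by name: the statement is the Claim_ definition above) =====
theorem get_clubs_of_friends_spec : Claim_equal_get_clubs_of_friends := by
  intro p2f p2c person _
  show _ = _
  unfold get_clubs_of_friends get_clubs_of_friends_alt
  simp only
  -- A side: the collected list, then sort
  have hA : (match pvLookup p2f person with | some v => v | none => []) = (pvLookup p2f person).getD [] := by
    cases pvLookup p2f person <;> rfl
  have hAo : (match pvLookup p2c person with | some v => v | none => []) = (pvLookup p2c person).getD [] := by
    cases pvLookup p2c person <;> rfl
  rw [hA, hAo, outerA_eq, countsB_eq]
  rw [PySem.Dict.keys_counter, List.nil_append]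
  have hL : ((pvLookup p2f person).getD []).flatMap
      (fun f => ((pvLookup p2c f).getD []).filter
        (fun c => !(((pvLookup p2c person).getD []).contains c)))
      = pvCollected p2f p2c person := rfl
  rw [hL, expansion_eq_sorted, PySem.List.foldl_append_eq_flatMap, List.nil_append]
  refine List.flatMap_congr (fun k _ => ?_)
  rw [PySem.Dict.getD_counter]
  simp
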